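-- pv_equiv track=rewrite | github.com/shubhams-git/AI-Project-Inference-Engine | CNFConverter.py | flatten_to_clauses
-- ===== SOURCE A (Python) =====
-- def flatten_to_clauses(parts):
--     clauses = []
--     current_clause = []
--     for part in parts:
--         if part == '&':
--             clauses.append(current_clause)
--             current_clause = []
--         elif part != '(' and part != ')':
--             current_clause.append(part)
--     if current_clause:
--         clauses.append(current_clause)
--     return clauses
-- ===== SOURCE B (Python) =====
-- def flatten_to_clauses(parts):
--     toks = [p for p in parts if p != '(' and p != ')']
--     segs = []
--     rest = toks
--     while '&' in rest:
--         i = rest.index('&')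
--         segs.append(rest[:i])
--         rest = rest[i+1:]
--     segs.append(rest)
--     if not segs[-1]:
--         segs.pop()
--     return segs
-- ===== Notes on version B (the rewrite author's own statement) =====
-- stated objective: alternative
-- what changed: Replaces A's element-by-element accumulator loop with a staged pipeline: filter out parentheses, then repeatedly cut the list at the first '&' via index/slice to collect whole clause segments, then drop a final empty segment.
import Mathlib
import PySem

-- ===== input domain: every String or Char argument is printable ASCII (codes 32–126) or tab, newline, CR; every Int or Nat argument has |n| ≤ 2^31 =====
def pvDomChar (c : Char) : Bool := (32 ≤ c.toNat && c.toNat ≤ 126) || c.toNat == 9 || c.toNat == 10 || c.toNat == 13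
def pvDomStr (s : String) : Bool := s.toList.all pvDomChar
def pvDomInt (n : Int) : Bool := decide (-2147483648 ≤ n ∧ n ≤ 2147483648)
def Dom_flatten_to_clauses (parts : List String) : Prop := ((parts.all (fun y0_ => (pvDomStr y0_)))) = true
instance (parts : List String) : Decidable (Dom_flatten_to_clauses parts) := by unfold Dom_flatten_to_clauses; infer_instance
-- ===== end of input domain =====

-- B replaces A's element-by-element accumulator loop with a staged pipeline: filter out parentheses, repeatedly cut at the first '&' via index/slice to collect whole segments, then drop a final empty segment; objective: alternative decomposition (same cost class).

-- ===== PORT A =====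
-- literal transliteration of A's loop: state = (clauses, current_clause)
def flatten_to_clauses (parts : List String) : List (List String) :=
  let st := parts.foldl
    (fun (st : List (List String) × List String) part =>
      if part = "&" then (st.1 ++ [st.2], [])
      else if part ≠ "(" ∧ part ≠ ")" then (st.1, st.2 ++ [part])
      else st)
    ([], [])
  if st.2 ≠ [] then st.1 ++ [st.2] else st.1

-- ===== PORT B =====
-- termination fact for the while loop: rest = rest[i+1:] strictly shrinks
theorem pvRestShrink (rest : List String) (h : "&" ∈ rest) :
    (PySem.List.slice rest (some (((((PySem.List.index? rest "&").getD 0) : Nat) : Int) + 1)) none).length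
      < rest.length := by
  have hlen : ((PySem.List.index? rest "&").getD 0) < rest.length := by
    rw [PySem.List.index?_eq_idxOf?]
    rcases hk : rest.idxOf? "&" with _ | k
    · rw [List.idxOf?_eq_none_iff] at hk; exact absurd h hk
    · obtain ⟨pre, suf, hsplit, hklen, -⟩ := (PySem.List.index?_eq_some_iff rest "&" k).mp
        (by rw [PySem.List.index?_eq_idxOf?, hk])
      subst hsplit; simp; omega
  have : ((((PySem.List.index? rest "&").getD 0 : Nat) : Int) + 1)
      = (((((PySem.List.index? rest "&").getD 0) + 1 : Nat)) : Int) := by push_cast; ring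
  rw [this, PySem.List.slice_from_natCast, List.length_drop]
  omega

-- B's while loop: segs/rest state, cut at first '&' each iteration
def bsplitLoop (segs : List (List String)) (rest : List String) : List (List String) :=
  if h : "&" ∈ rest then
    let i : Nat := (PySem.List.index? rest "&").getD 0
    bsplitLoop (segs ++ [PySem.List.slice rest none (some (i : Int))])
               (PySem.List.slice rest (some ((i : Int) + 1)) none)
  else segs ++ [rest]
termination_by rest.length
decreasing_by exact pvRestShrink rest h

def flatten_to_clauses_alt (parts : List String) : List (List String) :=
  let toks := parts.filter (fun p => p ≠ "(" ∧ p ≠ ")")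
  let segs := bsplitLoop [] toks
  if segs.getLast? = some [] then segs.dropLast else segs

-- ===== PRECONDITION & SPEC =====
def Spec_flatten_to_clauses (parts : List String) (out : List (List String)) : Prop := out = flatten_to_clauses_alt parts
instance (parts : List String) (out : List (List String)) : Decidable (Spec_flatten_to_clauses parts out) := by unfold Spec_flatten_to_clauses; infer_instance

-- ===== CLAIM (what is proved, stated in full; the proofs are below) =====
def Claim_equal_flatten_to_clauses : Prop := ∀ (parts : List String), Dom_flatten_to_clauses parts → Spec_flatten_to_clauses parts (flatten_to_clauses parts)

-- ===== LEMMAS AND PROOFS =====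

-- proof-side normal form: split the token list at '&', keeping empty segments
def splitAmp (toks : List String) : List (List String) :=
  toks.foldr
    (fun t segs => if t = "&" then [] :: segs else (t :: segs.headD []) :: segs.tail)
    [[]]

theorem splitAmp_cons (h : String) (t : List String) :
    splitAmp (h :: t) = if h = "&" then [] :: splitAmp t
      else (h :: (splitAmp t).headD []) :: (splitAmp t).tail := rfl

theorem splitAmp_ne_nil (l : List String) : splitAmp l ≠ [] := by
  cases l with
  | nil => simp [splitAmp]
  | cons h t => rw [splitAmp_cons]; split <;> simp

theorem splitAmp_no_amp (l : List String) (h : "&" ∉ l) : splitAmp l = [l] := by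
  induction l with
  | nil => rfl
  | cons a t ih =>
    have ha : a ≠ "&" := by intro e; exact h (by simp [e])
    have ht : "&" ∉ t := fun m => h (List.mem_cons_of_mem _ m)
    rw [splitAmp_cons, if_neg ha, ih ht]; simp

theorem splitAmp_split (pre suf : List String) (h : "&" ∉ pre) :
    splitAmp (pre ++ "&" :: suf) = pre :: splitAmp suf := by
  induction pre with
  | nil => simp [splitAmp_cons]
  | cons a t ih =>
    have ha : a ≠ "&" := by intro e; exact h (by simp [e])
    have ht : "&" ∉ t := fun m => h (List.mem_cons_of_mem _ m)
    rw [List.cons_append, splitAmp_cons, if_neg ha, ih ht]; simp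

theorem bsplitLoop_eq (n : Nat) : ∀ (rest : List String), rest.length ≤ n →
    ∀ segs, bsplitLoop segs rest = segs ++ splitAmp rest := by
  induction n with
  | zero =>
    intro rest hle segs
    have : rest = [] := List.eq_nil_of_length_eq_zero (Nat.le_zero.mp hle)
    subst this
    rw [bsplitLoop, dif_neg (by simp)]
    simp [splitAmp]
  | succ n ih =>
    intro rest hle segs
    by_cases h : "&" ∈ rest
    · obtain ⟨k, hk⟩ : ∃ k, PySem.List.index? rest "&" = some k := by
        rcases hx : PySem.List.index? rest "&" with _ | k
        · rw [PySem.List.index?_eq_none_iff] at hx; exact absurd h hx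
        · exact ⟨k, rfl⟩
      obtain ⟨pre, suf, hsplit, hklen, hpre⟩ := (PySem.List.index?_eq_some_iff rest "&" k).mp hk
      have htake : PySem.List.slice rest none (some (k : Int)) = pre := by
        rw [PySem.List.slice_to_natCast, hsplit, ← hklen, List.take_left]
      have hdrop : PySem.List.slice rest (some ((k : Int) + 1)) none = suf := by
        have : ((k : Int) + 1) = (((k + 1 : Nat)) : Int) := by push_cast; ring
        rw [this, PySem.List.slice_from_natCast, hsplit, ← hklen]
        rw [show pre.length + 1 = (pre ++ ["&"]).length by simp]
        rw [show pre ++ "&" :: suf = (pre ++ ["&"]) ++ suf by simp]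
        exact List.drop_left
      have hsuflen : suf.length ≤ n := by
        have := hle
        rw [hsplit] at this; simp at this; omega
      rw [bsplitLoop, dif_pos h]
      simp only [hk, Option.getD_some, htake, hdrop]
      rw [ih suf hsuflen, hsplit, splitAmp_split pre suf hpre]
      simp
    · rw [bsplitLoop, dif_neg h, splitAmp_no_amp rest h]

-- the loop body of A, named for the lemmas
def stepA (st : List (List String) × List String) (part : String) : List (List String) × List String :=
  if part = "&" then (st.1 ++ [st.2], [])
  else if part ≠ "(" ∧ part ≠ ")" then (st.1, st.2 ++ [part])
  else st

-- the filter of B, named so the invariant stays readable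
def filt (l : List String) : List String := l.filter (fun p => p ≠ "(" ∧ p ≠ ")")

-- prepend cur to the first segment
def preSeg (cur : List String) : List (List String) → List (List String)
  | [] => [cur]
  | s :: ss => (cur ++ s) :: ss

-- loop invariant for A: the fold from (cl, cur) is described by splitAmp of the filtered remainder
theorem foldA_char (parts : List String) : ∀ (cl : List (List String)) (cur : List String),
    parts.foldl stepA (cl, cur)
      = (cl ++ (preSeg cur (splitAmp (filt parts))).dropLast,
         (preSeg cur (splitAmp (filt parts))).getLast?.getD []) := by
  induction parts with
  | nil => intro cl cur; simp [filt, splitAmp, preSeg]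
  | cons h t ih =>
    intro cl cur
    obtain ⟨s, ss, hS⟩ := List.exists_cons_of_ne_nil (splitAmp_ne_nil (filt t))
    by_cases hamp : h = "&"
    · subst hamp
      have hfilt : filt ("&" :: t) = "&" :: filt t := by simp [filt]
      have hstep : stepA (cl, cur) "&" = (cl ++ [cur], []) := by simp [stepA]
      simp only [List.foldl_cons, hstep, ih, hfilt, splitAmp_cons, hS, preSeg]
      cases ss <;> simp
    · by_cases hpar : h = "(" ∨ h = ")"
      · have hfilt : filt (h :: t) = filt t := by
          rcases hpar with h1 | h1 <;> subst h1 <;> simp [filt]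
        have hstep : stepA (cl, cur) h = (cl, cur) := by
          rcases hpar with h1 | h1 <;> subst h1 <;> simp [stepA]
        simp only [List.foldl_cons, hstep, ih, hfilt]
      · push Not at hpar
        have hfilt : filt (h :: t) = h :: filt t := by simp [filt, hpar.1, hpar.2]
        have hstep : stepA (cl, cur) h = (cl, cur ++ [h]) := by
          simp [stepA, hamp, hpar.1, hpar.2]
        simp only [List.foldl_cons, hstep, ih, hfilt, splitAmp_cons, if_neg hamp, hS, preSeg]
        cases ss <;> simp

-- ===== VERDICT (by name: the statement is the Claim_ definition above) =====
theorem flatten_to_clauses_spec : Claim_equal_flatten_to_clauses := by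
  intro parts _
  unfold Spec_flatten_to_clauses flatten_to_clauses flatten_to_clauses_alt
  have hA : parts.foldl
      (fun (st : List (List String) × List String) part =>
        if part = "&" then (st.1 ++ [st.2], [])
        else if part ≠ "(" ∧ part ≠ ")" then (st.1, st.2 ++ [part])
        else st) ([], []) = parts.foldl stepA ([], []) := rfl
  have hF : parts.filter (fun p => p ≠ "(" ∧ p ≠ ")") = filt parts := rfl
  have hsegs : bsplitLoop [] (filt parts) = splitAmp (filt parts) := by
    simpa using bsplitLoop_eq (filt parts).length (filt parts) le_rfl []
  obtain ⟨s, ss, hS⟩ := List.exists_cons_of_ne_nil (splitAmp_ne_nil (filt parts))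
  have hpre : preSeg [] (s :: ss) = s :: ss := by simp [preSeg]
  rw [hA, foldA_char parts [] []]
  simp only [hF, hsegs, hS, hpre, List.nil_append]
  have hne : (s :: ss) ≠ ([] : List (List String)) := by simp
  have hlast : (s :: ss).getLast? = some ((s :: ss).getLast hne) := List.getLast?_eq_some_getLast hne
  by_cases hemp : (s :: ss).getLast hne = []
  · rw [if_neg (by simp [hlast, hemp]), if_pos (by rw [hlast, hemp])]
  · rw [if_pos (by simp [hlast, hemp]), if_neg (by rw [hlast]; simp [hemp])]
    rw [show (s :: ss).getLast?.getD [] = (s :: ss).getLast hne by rw [hlast]; rfl]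
    exact List.dropLast_append_getLast hne
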